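-- pv_equiv track=rewrite | github.com/srosenthal/nagbot | app/sqaws.py | get_tag_names
-- ===== SOURCE A (Python) =====
-- def get_tag_names(tags: dict) -> tuple:
--     stop_after_tag_name, terminate_after_tag_name, nagbot_state_tag_name = 'StopAfter', 'TerminateAfter', 'NagbotState'
--     for key, value in tags.items():
--         if (key.lower()).startswith('stop') and 'after' in (key.lower()):
--             stop_after_tag_name = key
--         if (key.lower()).startswith('terminate') and 'after' in (key.lower()):
--             terminate_after_tag_name = key
--         if (key.lower()).startswith('nagbot') and 'state' in (key.lower()):
--             nagbot_state_tag_name = key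
--     return stop_after_tag_name, terminate_after_tag_name, nagbot_state_tag_name
-- ===== SOURCE B (Python) =====
-- def get_tag_names(tags: dict) -> tuple:
--     def last_key(pred, default):
--         return next((k for k in reversed(list(tags)) if pred(k.lower())), default)
--     stop_after_tag_name = last_key(lambda k: k.startswith('stop') and 'after' in k, 'StopAfter')
--     terminate_after_tag_name = last_key(lambda k: k.startswith('terminate') and 'after' in k, 'TerminateAfter')
--     nagbot_state_tag_name = last_key(lambda k: k.startswith('nagbot') and 'state' in k, 'NagbotState')
--     return stop_after_tag_name, terminate_after_tag_name, nagbot_state_tag_name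
-- ===== Notes on version B (the rewrite author's own statement) =====
-- stated objective: simpler
-- what changed: Replaced the single fused three-branch last-match-wins loop with a small helper that does a reversed first-match scan of the keys, called once per tag name.
import Mathlib
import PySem

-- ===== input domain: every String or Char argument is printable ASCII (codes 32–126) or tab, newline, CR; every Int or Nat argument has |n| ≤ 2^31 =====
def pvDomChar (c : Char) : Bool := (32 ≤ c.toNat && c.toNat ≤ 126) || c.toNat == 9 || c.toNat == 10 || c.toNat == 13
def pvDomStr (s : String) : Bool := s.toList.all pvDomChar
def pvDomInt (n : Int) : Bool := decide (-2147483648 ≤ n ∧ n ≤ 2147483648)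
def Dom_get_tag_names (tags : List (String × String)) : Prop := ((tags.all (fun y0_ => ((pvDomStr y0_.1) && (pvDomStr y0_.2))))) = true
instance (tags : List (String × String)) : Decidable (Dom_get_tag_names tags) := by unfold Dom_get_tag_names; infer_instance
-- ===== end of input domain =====

-- B replaces A's single fused three-accumulator loop with one helper doing a
-- reversed first-match scan of the keys, called once per tag name (objective: simpler).

-- ===== PORT A =====
-- predicates on the lowercased key, as A writes them
def pvStopPred (lk : String) : Bool := PySem.Str.startswith lk "stop" && PySem.Str.isIn "after" lk
def pvTermPred (lk : String) : Bool := PySem.Str.startswith lk "terminate" && PySem.Str.isIn "after" lk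
def pvNagPred (lk : String) : Bool := PySem.Str.startswith lk "nagbot" && PySem.Str.isIn "state" lk

def get_tag_names (tags : List (String × String)) : String × String × String :=
  tags.foldl
    (fun st kv =>
      let key := kv.1
      let st1 := if pvStopPred (PySem.Str.lower key) then (key, st.2.1, st.2.2) else st
      let st2 := if pvTermPred (PySem.Str.lower key) then (st1.1, key, st1.2.2) else st1
      if pvNagPred (PySem.Str.lower key) then (st2.1, st2.2.1, key) else st2)
    ("StopAfter", "TerminateAfter", "NagbotState")

-- ===== PORT B =====
-- last key (in insertion order) whose lowercase satisfies pred, as a reversed first-match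
def pvLastKey (pred : String → Bool) (default : String) (tags : List (String × String)) : String :=
  (((tags.map Prod.fst).reverse.find? (fun k => pred (PySem.Str.lower k))).getD default)

def get_tag_names_alt (tags : List (String × String)) : String × String × String :=
  (pvLastKey pvStopPred "StopAfter" tags,
   pvLastKey pvTermPred "TerminateAfter" tags,
   pvLastKey pvNagPred "NagbotState" tags)

-- ===== PRECONDITION & SPEC =====
def Spec_get_tag_names (tags : List (String × String)) (out : String × String × String) : Prop := out = get_tag_names_alt tags
instance (tags : List (String × String)) (out : String × String × String) : Decidable (Spec_get_tag_names tags out) := by unfold Spec_get_tag_names; infer_instance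

-- ===== CLAIM (what is proved, stated in full; the proofs are below) =====
def Claim_equal_get_tag_names : Prop := ∀ (tags : List (String × String)), Dom_get_tag_names tags → Spec_get_tag_names tags (get_tag_names tags)

-- ===== LEMMAS AND PROOFS =====

theorem fold_eq_lastKeys (tags : List (String × String)) :
    ∀ (a b c : String),
      tags.foldl
        (fun st kv =>
          let key := kv.1
          let st1 := if pvStopPred (PySem.Str.lower key) then (key, st.2.1, st.2.2) else st
          let st2 := if pvTermPred (PySem.Str.lower key) then (st1.1, key, st1.2.2) else st1
          if pvNagPred (PySem.Str.lower key) then (st2.1, st2.2.1, key) else st2)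
        (a, b, c)
      = (pvLastKey pvStopPred a tags, pvLastKey pvTermPred b tags, pvLastKey pvNagPred c tags) := by
  induction tags with
  | nil => intro a b c; simp [pvLastKey]
  | cons kv rest ih =>
    intro a b c
    simp only [List.foldl_cons]
    rw [ih]
    have h : ∀ (pred : String → Bool) (d : String),
        pvLastKey pred d (kv :: rest)
          = pvLastKey pred (if pred (PySem.Str.lower kv.1) then kv.1 else d) rest := by
      intro pred d
      simp only [pvLastKey, List.map_cons, List.reverse_cons, List.find?_append]
      cases hf : (rest.map Prod.fst).reverse.find? (fun k => pred (PySem.Str.lower k)) with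
      | some x => simp
      | none =>
        simp only [Option.none_or]
        by_cases hp : pred (PySem.Str.lower kv.1) <;> simp [List.find?, hp]
    rw [h, h, h]
    by_cases h1 : pvStopPred (PySem.Str.lower kv.1) <;>
      by_cases h2 : pvTermPred (PySem.Str.lower kv.1) <;>
        by_cases h3 : pvNagPred (PySem.Str.lower kv.1) <;>
          simp [h1, h2, h3]

-- ===== VERDICT (by name: the statement is the Claim_ definition above) =====
theorem get_tag_names_spec : Claim_equal_get_tag_names := by
  intro tags _
  unfold Spec_get_tag_names get_tag_names get_tag_names_alt
  exact fold_eq_lastKeys tags "StopAfter" "TerminateAfter" "NagbotState"
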